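-- pv_equiv track=rewrite | github.com/uchicagoci/uchicagoci.github.io | scripts/convert_excel_to_yml.py | extract_papers_from_content
-- ===== SOURCE A (Python) =====
-- def extract_papers_from_content(content):
--     # Split content into lines
--     lines = content.split('\n')
--     papers = []
--     current_paper = []
--
--     # Flag to indicate if we're currently inside a paper block
--     in_paper = False
--
--     for line in lines:
--         # New paper starts
--         if line.strip().startswith('- title:'):
--             # If we were already processing a paper, save it
--             if current_paper:
--                 papers.append('\n'.join(current_paper))
--                 current_paper = []
--             # Start new paper
--             current_paper = [line]
--             in_paper = True
--         # Continue current paper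
--         elif in_paper and line.strip() and (line.startswith('  ') or line.startswith('\t')):
--             current_paper.append(line)
--
--     # Don't forget to add the last paper
--     if current_paper:
--         papers.append('\n'.join(current_paper))
--
--     return papers
-- ===== SOURCE B (Python) =====
-- def _is_title(line):
--     return line.strip().startswith('- title:')
--
--
-- def _is_cont(line):
--     return bool(line.strip()) and (line.startswith('  ') or line.startswith('\t'))
--
--
-- def extract_papers_from_content(content):
--     # Boundary-segment decomposition: locate each title line, then build the
--     # paper from the segment up to the next title line.
--     lines = content.split('\n')
--     n = len(lines)
--     papers = []
--     i = 0
--     while i < n: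
--         if not _is_title(lines[i]):
--             i += 1
--             continue
--         j = i + 1
--         while j < n and not _is_title(lines[j]):
--             j += 1
--         body = [lines[i]] + [l for l in lines[i + 1:j] if _is_cont(l)]
--         papers.append('\n'.join(body))
--         i = j
--     return papers
-- ===== Notes on version B (the rewrite author's own statement) =====
-- stated objective: alternative
-- what changed: Replaces A's carried state machine (in_paper flag plus flush-on-next-title accumulator) with a boundary-segment decomposition: find each title line, scan forward to the next title, and build the paper directly from that segment.
import Mathlib
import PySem

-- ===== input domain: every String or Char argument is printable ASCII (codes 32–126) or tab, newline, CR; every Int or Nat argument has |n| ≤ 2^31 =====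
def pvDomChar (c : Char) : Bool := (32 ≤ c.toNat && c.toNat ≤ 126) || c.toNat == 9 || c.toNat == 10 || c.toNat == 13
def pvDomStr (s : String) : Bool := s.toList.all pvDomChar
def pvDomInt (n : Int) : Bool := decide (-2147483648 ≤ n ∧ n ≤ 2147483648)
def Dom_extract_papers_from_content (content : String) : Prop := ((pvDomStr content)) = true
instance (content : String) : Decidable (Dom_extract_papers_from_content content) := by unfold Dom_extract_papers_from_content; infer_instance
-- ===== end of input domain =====

-- B replaces A's carried state machine (in_paper flag + flush-on-next-title accumulator)
-- with a boundary-segment decomposition (find each title line, take the segment up to the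
-- next title, build the paper from it); same cost, alternative structure.

-- ===== PORT A =====
-- one loop step of A's for-loop; state = (papers, current_paper, in_paper)
def pvStepA (st : List String × List String × Bool) (line : String) :
    List String × List String × Bool :=
  if PySem.Str.startswith (PySem.Str.strip line) "- title:" then
    ((if st.2.1.isEmpty then st.1 else st.1 ++ [PySem.Str.join "\n" st.2.1]), [line], true)
  else if st.2.2 && (PySem.Str.strip line != "")
        && (PySem.Str.startswith line "  " || PySem.Str.startswith line "\t") then
    (st.1, st.2.1 ++ [line], st.2.2)
  else st

def extract_papers_from_content (content : String) : List String :=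
  let lines := ((PySem.Str.split? content "\n").getD [])
  let st := lines.foldl pvStepA ([], [], false)
  if st.2.1.isEmpty then st.1 else st.1 ++ [PySem.Str.join "\n" st.2.1]

-- ===== PORT B =====
def pvIsTitle (line : String) : Bool :=
  PySem.Str.startswith (PySem.Str.strip line) "- title:"

def pvIsCont (line : String) : Bool :=
  (PySem.Str.strip line != "")
    && (PySem.Str.startswith line "  " || PySem.Str.startswith line "\t")

-- Source B's outer while: skip to next title line; the inner while + slice lines[i+1:j]
-- is the takeWhile/dropWhile split at the next title line
def pvBuild : List String → List String
  | [] => []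
  | l :: rest =>
    if pvIsTitle l then
      PySem.Str.join "\n" (l :: (rest.takeWhile (fun x => !pvIsTitle x)).filter pvIsCont)
        :: pvBuild (rest.dropWhile (fun x => !pvIsTitle x))
    else pvBuild rest
termination_by ls => ls.length
decreasing_by
  · exact Nat.lt_succ_of_le (List.length_dropWhile_le _ _)
  · simp

def extract_papers_from_content_alt (content : String) : List String :=
  pvBuild (((PySem.Str.split? content "\n").getD []))

-- ===== PRECONDITION & SPEC =====
def Spec_extract_papers_from_content (content : String) (out : List String) : Prop := out = extract_papers_from_content_alt content
instance (content : String) (out : List String) : Decidable (Spec_extract_papers_from_content content out) := by unfold Spec_extract_papers_from_content; infer_instance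

-- ===== CLAIM (what is proved, stated in full; the proofs are below) =====
def Claim_equal_extract_papers_from_content : Prop := ∀ (content : String), Dom_extract_papers_from_content content → Spec_extract_papers_from_content content (extract_papers_from_content content)

-- ===== LEMMAS AND PROOFS =====

-- finalize A's loop state
def pvFinA (st : List String × List String × Bool) : List String :=
  if st.2.1.isEmpty then st.1 else st.1 ++ [PySem.Str.join "\n" st.2.1]

-- inside a paper (in_paper = true, current_paper = cur ≠ []): the rest of the run
-- appends one paper made of cur plus the filtered segment up to the next title,
-- then behaves like pvBuild on the remainder
lemma pvL1 (lines : List String) : ∀ (papers cur : List String), cur ≠ [] →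
    pvFinA (lines.foldl pvStepA (papers, cur, true))
    = papers ++ (PySem.Str.join "\n"
          (cur ++ (lines.takeWhile (fun x => !pvIsTitle x)).filter pvIsCont)
        :: pvBuild (lines.dropWhile (fun x => !pvIsTitle x))) := by
  induction lines with
  | nil =>
    intro papers cur hc
    simp [pvFinA, pvBuild, List.isEmpty_iff, hc]
  | cons l rest ih =>
    intro papers cur hc
    by_cases ht : pvIsTitle l
    · have hstep : pvStepA (papers, cur, true) l
          = (papers ++ [PySem.Str.join "\n" cur], [l], true) := by
        simp [pvStepA, pvIsTitle] at ht ⊢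
        simp [ht, hc]
      rw [List.foldl_cons, hstep, ih _ [l] (by simp)]
      simp [ht, pvBuild]
    · have hT : (!pvIsTitle l) = true := by simp [ht]
      by_cases hcnt : pvIsCont l
      · have hstep : pvStepA (papers, cur, true) l = (papers, cur ++ [l], true) := by
          simp [pvStepA, pvIsTitle, pvIsCont] at ht hcnt ⊢
          simp [ht, hcnt]
        rw [List.foldl_cons, hstep, ih _ (cur ++ [l]) (by simp)]
        simp [hT, hcnt]
      · have hstep : pvStepA (papers, cur, true) l = (papers, cur, true) := by
          simp [pvStepA, pvIsTitle, pvIsCont] at ht hcnt ⊢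
          have hnc : ¬(¬PySem.Str.strip l = "" ∧
              (PySem.Chars.startswith l.toList [' ', ' '] = true ∨
                PySem.Chars.startswith l.toList ['\t'] = true)) := by
            rintro ⟨h1, h2 | h2⟩ <;> simp [h2] at hcnt <;> exact h1 hcnt
          simp [ht, hnc]
        rw [List.foldl_cons, hstep, ih _ cur hc]
        simp [hT, hcnt]

-- before the first title (in_paper = false, current_paper = []): the run is pvBuild
lemma pvL2 (lines : List String) : ∀ (papers : List String),
    pvFinA (lines.foldl pvStepA (papers, [], false)) = papers ++ pvBuild lines := by
  induction lines with
  | nil => intro papers; simp [pvFinA, pvBuild]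
  | cons l rest ih =>
    intro papers
    by_cases ht : pvIsTitle l
    · have hstep : pvStepA (papers, [], false) l = (papers, [l], true) := by
        simp [pvStepA, pvIsTitle] at ht ⊢
        simp [ht]
      rw [List.foldl_cons, hstep, pvL1 rest papers [l] (by simp)]
      simp [pvBuild, ht]
    · have hstep : pvStepA (papers, [], false) l = (papers, [], false) := by
        simp [pvStepA, pvIsTitle] at ht ⊢
        simp [ht]
      rw [List.foldl_cons, hstep, ih papers]
      simp [pvBuild, ht]

-- ===== VERDICT (by name: the statement is the Claim_ definition above) =====
theorem extract_papers_from_content_spec : Claim_equal_extract_papers_from_content := by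
  intro content _
  unfold Spec_extract_papers_from_content extract_papers_from_content extract_papers_from_content_alt
  simpa [pvFinA] using pvL2 (((PySem.Str.split? content "\n").getD [])) []
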